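-- pv_equiv track=rewrite | github.com/davershayan12/PYTHON-PROJECTS | PYTHON-LABS-AND-THEORY/PYTHON-WEEK-7/PYTHON-WEEK7-PART.py | common_gcd
-- ===== SOURCE A (Python) =====
-- def common_gcd(x,y):
--    result=1
--    a=[]
--    b=[]
--    c=[]
--    ans=x
--    ans1=y
--    j=0
--    i=2
--    while True:
--     if ans%i==0:
--         ans=int(ans/i)
--         a.append(i)
--         j+=1
--         i=2
--         continue
--     i+=1
--     if ans==1:
--      break
--    j=0
--    i=2
--    while True:
--     if ans1%i==0:
--         ans1=int(ans1/i)
--         b.append(i)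
--         j+=1
--         i=2
--         continue
--     i+=1
--     if ans1==1:
--         break
--    r=0
--    for i in range(len(a)):
--        for j in range(len(b)):
--           if a[i]==b[j]:
--             c.append(a[i])
--             r+=1
--             break
--    for i in range(len(c)):
--        result*=c[i]
--    return result
-- ===== SOURCE B (Python) =====
-- def common_gcd(x, y):
--     # Product over each prime p dividing x of p**vp(x), for the primes that also divide y.
--     # Trial division of x up to sqrt(n); y is never factored: a single y % p test suffices.
--     result = 1
--     n = x
--     d = 2
--     while d * d <= n:
--         if n % d == 0:
--             e = 0
--             while n % d == 0:
--                 n //= d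
--                 e += 1
--             if y % d == 0:
--                 result *= d ** e
--         else:
--             d += 1
--     if n > 1 and y % n == 0:
--         result *= n
--     return result
-- ===== Notes on version B (the rewrite author's own statement) =====
-- stated objective: faster
-- what changed: B trial-divides x only up to sqrt of the shrinking cofactor and replaces A's full factorization of y plus the quadratic nested matching loop by a single y % p divisibility test per prime of x.
import Mathlib
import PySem

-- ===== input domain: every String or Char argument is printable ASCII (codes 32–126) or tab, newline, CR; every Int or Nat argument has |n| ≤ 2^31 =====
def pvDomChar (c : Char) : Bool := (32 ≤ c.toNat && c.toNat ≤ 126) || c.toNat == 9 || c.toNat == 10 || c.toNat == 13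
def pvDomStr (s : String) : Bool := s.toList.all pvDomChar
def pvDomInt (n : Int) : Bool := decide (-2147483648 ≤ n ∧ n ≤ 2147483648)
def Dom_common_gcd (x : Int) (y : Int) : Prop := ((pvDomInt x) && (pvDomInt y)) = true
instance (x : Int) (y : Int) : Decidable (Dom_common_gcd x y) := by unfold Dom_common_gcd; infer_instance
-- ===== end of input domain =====

-- B replaces A's restart-from-2 factorization of x, full factorization of y and nested matching
-- loop by trial division of x up to sqrt of the shrinking cofactor plus one y % p test per prime.

-- ===== PORT A =====
-- A's factor loop `while True: if ans%i==0: ans=int(ans/i); a.append(i); i=2; continue; i+=1; if ans==1: break`.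
-- Fuel makes the loop total (it diverges in Python for ans ≤ 0, excluded by Pre_); 2*ans+2 steps
-- are proved sufficient on Pre_.  `int(ans/i)` is exact division of positives on the admitted
-- inputs, where floor division coincides with it.
def pvFactLoop (fuel : Nat) (ans : Int) (i : Int) (acc : List Int) : List Int :=
  match fuel with
  | 0 => acc
  | f + 1 =>
    if PySem.Int.mod ans i = 0 then pvFactLoop f (PySem.Int.floordiv ans i) 2 (acc ++ [i])
    else if ans = 1 then acc
    else pvFactLoop f ans (i + 1) acc

def common_gcd (x : Int) (y : Int) : Int :=
  let a := pvFactLoop (2 * x.toNat + 2) x 2 []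
  let b := pvFactLoop (2 * y.toNat + 2) y 2 []
  -- for i in range(len(a)): for j in range(len(b)): if a[i]==b[j]: c.append(a[i]); break
  let c := a.foldl (fun c ai => if b.any (fun bj => bj == ai) then c ++ [ai] else c) ([] : List Int)
  -- for i in range(len(c)): result *= c[i]
  c.foldl (fun result ci => result * ci) 1

-- ===== PORT B =====
-- inner `while n % d == 0: n //= d; e += 1` (fuel-totalized; n.toNat steps suffice on Pre_)
def pvDivOut (fuel : Nat) (n : Int) (d : Int) (e : Nat) : Int × Nat :=
  match fuel with
  | 0 => (n, e)
  | f + 1 => if PySem.Int.mod n d = 0 then pvDivOut f (PySem.Int.floordiv n d) d (e + 1) else (n, e)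

-- outer `while d * d <= n:` loop of B (fuel-totalized; x.toNat + 2 steps suffice on Pre_)
def pvAltLoop (fuel : Nat) (y : Int) (n : Int) (d : Int) (result : Int) : Int :=
  match fuel with
  | 0 => result
  | f + 1 =>
    if d * d ≤ n then
      if PySem.Int.mod n d = 0 then
        let r := pvDivOut n.toNat n d 0
        pvAltLoop f y r.1 d (if PySem.Int.mod y d = 0 then result * d ^ r.2 else result)
      else pvAltLoop f y n (d + 1) result
    else if 1 < n ∧ PySem.Int.mod y n = 0 then result * n else result

def common_gcd_alt (x : Int) (y : Int) : Int :=
  pvAltLoop (x.toNat + 2) y x 2 1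

-- ===== PRECONDITION & SPEC =====
-- Pre_ excludes x ≤ 0 and y ≤ 0, on which A's trial-division loops never terminate (Python hangs).
def Pre_common_gcd (x : Int) (y : Int) : Prop := 1 ≤ x ∧ 1 ≤ y
instance (x : Int) (y : Int) : Decidable (Pre_common_gcd x y) := by unfold Pre_common_gcd; infer_instance
def pvWitness_common_gcd : Int × Int := (12, 18)

def Spec_common_gcd (x : Int) (y : Int) (out : Int) : Prop := out = common_gcd_alt x y
instance (x : Int) (y : Int) (out : Int) : Decidable (Spec_common_gcd x y out) := by unfold Spec_common_gcd; infer_instance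

-- ===== CLAIM (what is proved, stated in full; the proofs are below) =====
def Claim_equal_common_gcd : Prop := ∀ (x : Int) (y : Int), Dom_common_gcd x y → Pre_common_gcd x y → Spec_common_gcd x y (common_gcd x y)

-- ===== LEMMAS AND PROOFS =====

-- the common value: product of the prime factors of n (with multiplicity) that divide y
def pvShared (y : Int) (n : Nat) : Nat :=
  (n.primeFactorsList.filter (fun (p : Nat) => decide ((p : Int) ∣ y))).prod

theorem pvPFL_cons (n : Nat) (h : 2 ≤ n) :
    n.primeFactorsList = n.minFac :: (n / n.minFac).primeFactorsList := by
  match n, h with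
  | (k + 2), _ => rw [Nat.primeFactorsList]

-- i is the least divisor ≥ 2 when the scan finds it
theorem pvMinFac_eq (n i : Nat) (hn : 2 ≤ n) (hi : 2 ≤ i) (hdvd : i ∣ n)
    (hinv : ∀ k, 2 ≤ k → k < i → ¬ k ∣ n) : n.minFac = i := by
  have h1 : n.minFac ≤ i := Nat.minFac_le_of_dvd hi hdvd
  have h2 : n.minFac ∣ n := Nat.minFac_dvd n
  have h3 : 2 ≤ n.minFac := (Nat.minFac_prime (by omega)).two_le
  by_contra hne
  exact hinv n.minFac h3 (by omega) h2

-- A's factor loop returns the sorted prime factorization (with multiplicity)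
theorem pvFactLoop_eq (f : Nat) : ∀ (n i : Nat) (acc : List Int), 1 ≤ n → 2 ≤ i →
    (∀ k, 2 ≤ k → k < i → ¬ k ∣ n) → 2 * n + 2 ≤ f + i →
    pvFactLoop f ↑n ↑i acc = acc ++ n.primeFactorsList.map (fun (p : Nat) => (p : Int)) := by
  induction f with
  | zero =>
    intro n i acc hn hi hinv hf
    have hn1 : n = 1 := by
      by_contra h
      exact hinv n (by omega) (by omega) dvd_rfl
    subst hn1
    simp [pvFactLoop, Nat.primeFactorsList_one]
  | succ f ih =>
    intro n i acc hn hi hinv hf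
    rw [pvFactLoop]
    by_cases hdvd : i ∣ n
    · have hmod : PySem.Int.mod ↑n ↑i = 0 := by
        rw [PySem.Int.mod_eq_zero_iff_dvd]; exact_mod_cast hdvd
      rw [if_pos hmod, PySem.Int.floordiv_natCast]
      have hin : i ≤ n := Nat.le_of_dvd (by omega) hdvd
      have hn2 : 2 ≤ n := by omega
      have hmf : n.minFac = i := pvMinFac_eq n i hn2 hi hdvd hinv
      have hq1 : 1 ≤ n / i := (Nat.one_le_div_iff (by omega)).mpr hin
      have hq2 : n / i ≤ n / 2 := Nat.div_le_div_left hi (by omega)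
      have h22 : n / 2 * 2 ≤ n := Nat.div_mul_le_self n 2
      have h2c : ((2 : Nat) : Int) = (2 : Int) := by norm_num
      rw [← h2c]
      rw [ih (n / i) 2 (acc ++ [(i : Int)]) hq1 (le_refl 2) (by intro k hk hk2; omega)
          (by omega)]
      rw [pvPFL_cons n hn2, hmf]
      simp
    · have hmod : ¬ PySem.Int.mod (n : Int) (i : Int) = 0 := by
        rw [PySem.Int.mod_eq_zero_iff_dvd]
        intro h; exact hdvd (by exact_mod_cast h)
      rw [if_neg hmod]
      by_cases h1 : n = 1
      · subst h1
        rw [if_pos (by norm_num)]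
        simp [Nat.primeFactorsList_one]
      · rw [if_neg (by exact_mod_cast h1)]
        have hcast : ((i : Int) + 1) = ((i + 1 : Nat) : Int) := by push_cast; ring
        rw [hcast]
        refine ih n (i + 1) acc hn (by omega) ?_ (by omega)
        intro k hk hki
        rcases Nat.lt_succ_iff_lt_or_eq.mp hki with h | h
        · exact hinv k hk h
        · subst h; exact hdvd

theorem pvDivOut_eq (f : Nat) : ∀ (n d : Nat) (e : Nat), 1 ≤ n → 2 ≤ d → n ≤ f →
    ∃ k, pvDivOut f ↑n ↑d e = (↑(n / d ^ k), e + k) ∧ d ^ k ∣ n ∧ ¬ d ∣ (n / d ^ k) := by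
  induction f with
  | zero => intro n d e hn hd hf; omega
  | succ f ih =>
    intro n d e hn hd hf
    rw [pvDivOut]
    by_cases hdvd : d ∣ n
    · have hmod : PySem.Int.mod ↑n ↑d = 0 := by
        rw [PySem.Int.mod_eq_zero_iff_dvd]; exact_mod_cast hdvd
      rw [if_pos hmod, PySem.Int.floordiv_natCast]
      have hq1 : 1 ≤ n / d := (Nat.one_le_div_iff (by omega)).mpr (Nat.le_of_dvd (by omega) hdvd)
      have hqf : n / d ≤ f := by
        have h1 : n / d ≤ n / 2 := Nat.div_le_div_left hd (by omega)
        have h2 : n / 2 * 2 ≤ n := Nat.div_mul_le_self n 2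
        omega
      obtain ⟨k, hk, hdk, hnd⟩ := ih (n / d) d (e + 1) hq1 hd hqf
      have hdiv : n / d / d ^ k = n / d ^ (k + 1) := by
        rw [Nat.div_div_eq_div_mul, ← pow_succ']
      have hmul : d * (n / d) = n := Nat.mul_div_cancel' hdvd
      refine ⟨k + 1, ?_, ?_, ?_⟩
      · rw [hk, hdiv]
        congr 1
        omega
      · rw [pow_succ', ← hmul]
        exact mul_dvd_mul_left d hdk
      · rw [← hdiv]
        exact hnd
    · have hmod : ¬ PySem.Int.mod (n : Int) (d : Int) = 0 := by
        rw [PySem.Int.mod_eq_zero_iff_dvd]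
        intro h; exact hdvd (by exact_mod_cast h)
      rw [if_neg hmod]
      exact ⟨0, by simp, by simpa using hdvd⟩

theorem pvShared_split (y : Int) (d k m : Nat) (hd : d.Prime) (hm : 1 ≤ m) :
    pvShared y (d ^ k * m) = (if (d : Int) ∣ y then d ^ k else 1) * pvShared y m := by
  unfold pvShared
  have h0 : (d : Nat) ^ k ≠ 0 := pow_ne_zero k hd.pos.ne'
  have hperm := Nat.perm_primeFactorsList_mul h0 (by omega : m ≠ 0)
  rw [(hperm.filter _).prod_eq, List.filter_append, List.prod_append,
      hd.primeFactorsList_pow, List.filter_replicate]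
  by_cases h : (d : Int) ∣ y
  · simp [h, List.prod_replicate]
  · simp [h]

theorem pvAltLoop_eq (f : Nat) : ∀ (n d : Nat) (y result : Int), 1 ≤ n → 2 ≤ d →
    (∀ k, 2 ≤ k → k < d → ¬ k ∣ n) → 1 ≤ f → n + 2 ≤ f + d →
    pvAltLoop f y ↑n ↑d result = result * ↑(pvShared y n) := by
  induction f with
  | zero => intro n d y result _ _ _ h1 _; omega
  | succ f ih =>
    intro n d y result hn hd hinv _ hf
    rw [pvAltLoop]
    by_cases hdd : d * d ≤ n
    · have hddI : ((d : Int) * (d : Int) ≤ (n : Int)) := by exact_mod_cast hdd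
      rw [if_pos hddI]
      have hd2 : 2 * d ≤ n := le_trans (by nlinarith) hdd
      by_cases hdvd : d ∣ n
      · have hmod : PySem.Int.mod ↑n ↑d = 0 := by
          rw [PySem.Int.mod_eq_zero_iff_dvd]; exact_mod_cast hdvd
        rw [if_pos hmod]
        have htn : ((n : Int)).toNat = n := Int.toNat_natCast n
        obtain ⟨k, hk, hdk, hnd⟩ := pvDivOut_eq (((n : Int)).toNat) n d 0 hn hd (by omega)
        rw [hk]
        have hn2 : 2 ≤ n := by omega
        have hmf : n.minFac = d := pvMinFac_eq n d hn2 hd hdvd hinv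
        have hdp : d.Prime := hmf ▸ Nat.minFac_prime (by omega)
        have hmn : d ^ k * (n / d ^ k) = n := Nat.mul_div_cancel' hdk
        have hm1 : 1 ≤ n / d ^ k := (Nat.one_le_div_iff (Nat.pos_of_ne_zero (pow_ne_zero k hdp.pos.ne'))).mpr (Nat.le_of_dvd (by omega) hdk)
        have hk1 : 1 ≤ k := by
          rcases Nat.eq_zero_or_pos k with h | h
          · subst h; simp at hnd; exact absurd hdvd hnd
          · exact h
        have hdk2 : 2 ≤ d ^ k := le_trans hd (Nat.le_self_pow (by omega) d)
        have h2m : 2 * (n / d ^ k) ≤ n := by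
          calc 2 * (n / d ^ k) ≤ d ^ k * (n / d ^ k) := Nat.mul_le_mul_right _ hdk2
          _ = n := hmn
        rw [ih (n / d ^ k) d y _ hm1 hd
            (fun k2 hk2 hk2d hdvd2 => hinv k2 hk2 hk2d (hdvd2.trans (Dvd.intro_left _ hmn)))
            (by omega) (by omega)]
        rw [show (0 + k) = k by omega]
        conv_rhs => rw [← hmn]
        rw [pvShared_split y d k (n / d ^ k) hdp hm1]
        by_cases hy : (d : Int) ∣ y
        · rw [if_pos ((PySem.Int.mod_eq_zero_iff_dvd _ _).mpr hy), if_pos hy]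
          push_cast; ring
        · rw [if_neg (fun hc => hy ((PySem.Int.mod_eq_zero_iff_dvd _ _).mp hc)), if_neg hy]
          push_cast; ring
      · have hmod : ¬ PySem.Int.mod (n : Int) (d : Int) = 0 := by
          rw [PySem.Int.mod_eq_zero_iff_dvd]
          intro h; exact hdvd (by exact_mod_cast h)
        rw [if_neg hmod]
        have hcast : ((d : Int) + 1) = ((d + 1 : Nat) : Int) := by push_cast; ring
        rw [hcast]
        refine ih n (d + 1) y result hn (by omega) ?_ (by omega) (by omega)
        intro k hk hki
        rcases Nat.lt_succ_iff_lt_or_eq.mp hki with h | h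
        · exact hinv k hk h
        · subst h; exact hdvd
    · have hddI : ¬ ((d : Int) * (d : Int) ≤ (n : Int)) := by exact_mod_cast hdd
      rw [if_neg hddI]
      by_cases hn1 : n = 1
      · subst hn1
        rw [if_neg (by simp)]
        simp [pvShared, Nat.primeFactorsList_one]
      · have hn2 : 2 ≤ n := by omega
        have hprime : n.Prime := by
          by_contra hp
          have hsq := Nat.minFac_sq_le_self (by omega : 0 < n) hp
          have h2m : 2 ≤ n.minFac := (Nat.minFac_prime (by omega)).two_le
          have hmfd : n.minFac < d := by nlinarith [sq_nonneg (n.minFac : Int)]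
          exact hinv n.minFac h2m hmfd (Nat.minFac_dvd n)
        have hps : pvShared y n = if (n : Int) ∣ y then n else 1 := by
          unfold pvShared
          rw [Nat.primeFactorsList_prime hprime]
          by_cases h : (n : Int) ∣ y <;> simp [h]
        by_cases hy : (n : Int) ∣ y
        · rw [if_pos ⟨by exact_mod_cast hn2, (PySem.Int.mod_eq_zero_iff_dvd _ _).mpr hy⟩,
              hps, if_pos hy]
        · rw [if_neg (fun hc => hy ((PySem.Int.mod_eq_zero_iff_dvd _ _).mp hc.2)), hps,
              if_neg hy]
          simp

theorem pvFilter_mem (a b : Nat) (hb : 1 ≤ b) :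
    a.primeFactorsList.filter
      (fun (q : Nat) =>
        (b.primeFactorsList.map (fun (p : Nat) => (p : Int))).any (fun bj => bj == (q : Int)))
    = a.primeFactorsList.filter (fun (p : Nat) => decide ((p : Int) ∣ (b : Int))) := by
  apply List.filter_congr
  intro q hq
  have hqp := Nat.prime_of_mem_primeFactorsList hq
  have hmem : q ∈ b.primeFactorsList ↔ q ∣ b := by
    rw [Nat.mem_primeFactorsList (by omega : b ≠ 0)]
    exact ⟨fun h => h.2, fun h => ⟨hqp, h⟩⟩
  rw [Bool.eq_iff_iff]
  simp only [List.any_map, List.any_eq_true, Function.comp_apply, beq_iff_eq, Nat.cast_inj,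
    decide_eq_true_eq, Int.natCast_dvd_natCast]
  constructor
  · rintro ⟨p, hp, rfl⟩
    exact hmem.mp hp
  · intro h
    exact ⟨q, hmem.mpr h, rfl⟩

-- ===== VERDICT (by name: the statement is the Claim_ definition above) =====
theorem common_gcd_spec : Claim_equal_common_gcd := by
  intro x y _ hpre
  unfold Spec_common_gcd
  obtain ⟨hx, hy⟩ := hpre
  obtain ⟨a, rfl⟩ : ∃ a : Nat, ((a : Int)) = x := ⟨x.toNat, Int.toNat_of_nonneg (by omega)⟩
  obtain ⟨b, rfl⟩ : ∃ b : Nat, ((b : Int)) = y := ⟨y.toNat, Int.toNat_of_nonneg (by omega)⟩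
  have ha : 1 ≤ a := by exact_mod_cast hx
  have hb : 1 ≤ b := by exact_mod_cast hy
  unfold common_gcd common_gcd_alt
  simp only [Int.toNat_natCast]
  have h2 : ((2 : Nat) : Int) = (2 : Int) := by norm_num
  rw [← h2]
  rw [pvFactLoop_eq (2 * a + 2) a 2 [] ha (le_refl 2) (fun k hk hk2 => by omega) (by omega)]
  simp only [pvFactLoop_eq (2 * b + 2) b 2 [] hb (le_refl 2) (fun k hk hk2 => by omega)
    (by omega)]
  rw [pvAltLoop_eq (a + 2) a 2 ((b : Int)) 1 ha (le_refl 2) (fun k hk hk2 => by omega)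
    (by omega) (by omega)]
  rw [List.nil_append, List.nil_append]
  rw [PySem.List.foldl_append_if
      (fun ai => (b.primeFactorsList.map (fun (p : Nat) => (p : Int))).any (fun bj => bj == ai))
      (fun (x : Int) => x)]
  rw [List.nil_append, List.filter_map]
  simp only [Function.comp_def]
  rw [pvFilter_mem a b hb]
  rw [← List.prod_eq_foldl]
  simp only [pvShared, one_mul, List.map_id']
  exact (Nat.cast_list_prod (R := Int) _).symm
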